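-- pv_equiv track=rewrite | github.com/xicodomingues/festo-coding-challenge | 2020/puzzle_20.py | calculate_dist
-- ===== SOURCE A (Python) =====
-- def windows(sequence, limit=2):
--     results = []
--     iteration_length = len(sequence) - (limit - 1)
--     max_window_indicies = range(iteration_length)
--     for index in max_window_indicies:
--         results.append(sequence[index:index + limit])
--     return results
--
-- def calculate_dist(seq, distances):
--     paths = windows(seq)
--     total = distances["work"][seq[0]]
--     for path in paths:
--         d = distances[path[0]][path[1]]
--         total += d
--     total += distances[seq[-1]]["home"]
--     return total
-- ===== SOURCE B (Python) =====
-- def calculate_dist(seq, distances):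
--     ext = ["work"] + list(seq) + ["home"]
--
--     def cost(lo, hi):
--         # total distance along ext[lo..hi] by splitting at the midpoint
--         if hi - lo == 1:
--             return distances[ext[lo]][ext[hi]]
--         mid = (lo + hi) // 2
--         return cost(lo, mid) + cost(mid, hi)
--
--     return cost(0, len(ext) - 1)
-- ===== Notes on version B (the rewrite author's own statement) =====
-- stated objective: alternative
-- what changed: B builds the augmented path ['work', *seq, 'home'] and computes the total by divide-and-conquer on index ranges (split at the midpoint, add the two halves), instead of A's windows() list of 2-slices plus two special-cased endpoint additions.
import Mathlib
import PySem

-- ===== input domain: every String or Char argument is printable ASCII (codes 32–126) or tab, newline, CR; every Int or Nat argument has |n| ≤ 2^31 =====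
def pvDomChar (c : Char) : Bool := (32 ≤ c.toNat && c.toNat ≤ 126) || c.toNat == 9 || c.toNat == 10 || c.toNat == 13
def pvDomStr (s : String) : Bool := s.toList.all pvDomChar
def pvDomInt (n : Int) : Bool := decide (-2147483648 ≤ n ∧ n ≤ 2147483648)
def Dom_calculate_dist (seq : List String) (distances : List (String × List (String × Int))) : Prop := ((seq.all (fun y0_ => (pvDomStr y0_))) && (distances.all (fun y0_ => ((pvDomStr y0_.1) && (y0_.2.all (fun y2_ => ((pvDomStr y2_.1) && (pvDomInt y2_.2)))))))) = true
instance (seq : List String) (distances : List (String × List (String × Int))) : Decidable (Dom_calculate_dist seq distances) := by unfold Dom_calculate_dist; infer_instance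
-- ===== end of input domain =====

-- B computes the total over the augmented path ['work', *seq, 'home'] by divide-and-conquer on
-- index ranges (split at the midpoint), replacing A's windows() list plus endpoint special cases.

-- Python dict lookup (first matching key) on the association-list encoding; default used only
-- outside Pre_ (Python raises KeyError there).
def pvRow (distances : List (String × List (String × Int))) (k : String) : List (String × Int) :=
  ((distances.find? (fun p => p.1 == k)).map (·.2)).getD []

def pvDist (row : List (String × Int)) (k : String) : Int :=
  ((row.find? (fun p => p.1 == k)).map (·.2)).getD 0

-- ===== PORT A =====
def windowsA (sequence : List String) : List (List String) :=
  -- results = []; for index in range(len(sequence) - 1): results.append(sequence[index:index+2])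
  (PySem.List.pyRange 0 ((sequence.length : Int) - 1) 1).foldl
    (fun results index => results ++ [PySem.List.slice sequence (some index) (some (index + 2))]) []

def calculate_dist (seq : List String) (distances : List (String × List (String × Int))) : Int :=
  let paths := windowsA seq
  let total := pvDist (pvRow distances "work") (PySem.List.pyGetD seq 0 "")
  let total := paths.foldl
    (fun total path =>
      total + pvDist (pvRow distances (PySem.List.pyGetD path 0 "")) (PySem.List.pyGetD path 1 "")) total
  total + pvDist (pvRow distances (PySem.List.pyGetD seq (-1) "")) "home"

-- ===== PORT B =====
-- Python's nested 'cost(lo, hi)'; the extra fuel argument is a totality guard only: every call the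
-- program makes has lo < hi and fuel = hi - lo, where the fuel branch is unreachable (costB_eq below).
-- All indices ext[lo]/ext[hi] reached are nonnegative and in range, so List.getD is exact there.
def costB (distances : List (String × List (String × Int))) (ext : List String) :
    Nat → Nat → Nat → Int
  | 0, _, _ => 0
  | fuel + 1, lo, hi =>
    if hi - lo = 1 then pvDist (pvRow distances (ext.getD lo "")) (ext.getD hi "")
    else
      costB distances ext fuel lo ((lo + hi) / 2) + costB distances ext fuel ((lo + hi) / 2) hi

def calculate_dist_alt (seq : List String) (distances : List (String × List (String × Int))) : Int :=
  let ext := "work" :: (seq ++ ["home"])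
  costB distances ext (ext.length - 1) 0 (ext.length - 1)

-- ===== PRECONDITION & SPEC =====
-- Does the two-level dict lookup distances[a][b] succeed?
def pvHas (distances : List (String × List (String × Int))) (a b : String) : Bool :=
  match distances.find? (fun p => p.1 == a) with
  | some row => (row.2.find? (fun p => p.1 == b)).isSome
  | none => false

-- Pre_ excludes exactly the inputs where Python A raises: seq = [] (IndexError at seq[0]) and any
-- missing dict key along work→seq→home (KeyError).
def Pre_calculate_dist (seq : List String) (distances : List (String × List (String × Int))) : Prop :=
  seq ≠ [] ∧
    ((("work" :: (seq ++ ["home"])).zip (seq ++ ["home"])).all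
      (fun p => pvHas distances p.1 p.2)) = true

instance (seq : List String) (distances : List (String × List (String × Int))) : Decidable (Pre_calculate_dist seq distances) := by unfold Pre_calculate_dist; infer_instance

def pvWitness_calculate_dist : List String × (List (String × List (String × Int))) :=
  (["x"], [("work", [("x", 1)]), ("x", [("home", 2)])])

def Spec_calculate_dist (seq : List String) (distances : List (String × List (String × Int))) (out : Int) : Prop := out = calculate_dist_alt seq distances
instance (seq : List String) (distances : List (String × List (String × Int))) (out : Int) : Decidable (Spec_calculate_dist seq distances out) := by unfold Spec_calculate_dist; infer_instance

-- ===== CLAIM (what is proved, stated in full; the proofs are below) =====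
def Claim_equal_calculate_dist : Prop := ∀ (seq : List String) (distances : List (String × List (String × Int))), Dom_calculate_dist seq distances → Pre_calculate_dist seq distances → Spec_calculate_dist seq distances (calculate_dist seq distances)

-- ===== LEMMAS AND PROOFS =====

-- the weight of leg k of the augmented path
def legW (distances : List (String × List (String × Int))) (ext : List String) (k : Nat) : Int :=
  pvDist (pvRow distances (ext.getD k "")) (ext.getD (k + 1) "")

-- B's divide-and-conquer equals the sum of the leg weights of [lo, hi), given enough fuel.
theorem costB_eq (d : List (String × List (String × Int))) (ext : List String) :
    ∀ (fuel lo hi : Nat), lo < hi → hi - lo ≤ fuel →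
      costB d ext fuel lo hi = ∑ k ∈ Finset.Ico lo hi, legW d ext k := by
  intro fuel
  induction fuel with
  | zero => intro lo hi h1 h2; omega
  | succ n ih =>
    intro lo hi h1 h2
    by_cases hbase : hi - lo = 1
    · have : hi = lo + 1 := by omega
      subst this
      rw [show Finset.Ico lo (lo+1) = {lo} from by simp]
      simp [costB, legW]
    · have hmid1 : lo < (lo + hi) / 2 := by omega
      have hmid2 : (lo + hi) / 2 < hi := by omega
      rw [show costB d ext (n + 1) lo hi
            = costB d ext n lo ((lo + hi) / 2) + costB d ext n ((lo + hi) / 2) hi from by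
          simp [costB, hbase]]
      rw [ih lo ((lo + hi) / 2) hmid1 (by omega), ih ((lo + hi) / 2) hi hmid2 (by omega)]
      exact Finset.sum_Ico_consecutive _ (by omega) (by omega)

-- consecutive pairs of a list, indexed
theorem zip_tail_get (nodes : List String) :
    nodes.zip nodes.tail
      = (List.range (nodes.length - 1)).map (fun k => (nodes.getD k "", nodes.getD (k + 1) "")) := by
  induction nodes with
  | nil => simp
  | cons x xs ih =>
    cases xs with
    | nil => simp
    | cons y t =>
      simp only [List.length_cons, Nat.add_sub_cancel, List.range_succ_eq_map, List.map_cons,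
        List.map_map, List.zip_cons_cons, List.tail_cons] at ih ⊢
      rw [ih]
      simp [Function.comp]

-- zipping the 'home'-extended path with its tail appends the (last, 'home') pair.
theorem zip_append_home {α : Type} (h d : α) (xs : List α) (hne : xs ≠ []) :
    (xs ++ [h]).zip (xs.tail ++ [h]) = xs.zip xs.tail ++ [(xs.getLast?.getD d, h)] := by
  induction xs with
  | nil => simp at hne
  | cons x t ih =>
    cases t with
    | nil => simp
    | cons y u =>
      have h2 := ih (by simp)
      simp only [List.tail_cons, List.cons_append] at h2 ⊢
      simp only [List.zip_cons_cons]
      rw [h2]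
      simp

theorem sum_map_range {M : Type} [AddCommMonoid M] (f : Nat → M) (n : Nat) :
    ((List.range n).map f).sum = ∑ k ∈ Finset.range n, f k := by
  induction n with
  | zero => simp
  | succ m ih => rw [List.range_succ, Finset.sum_range_succ, ← ih]; simp

-- A's windows(seq) is the list [a, b] for each consecutive pair (a, b) of seq.
theorem windowsA_eq_zip (seq : List String) :
    windowsA seq = (seq.zip seq.tail).map (fun p => [p.1, p.2]) := by
  unfold windowsA
  rw [show (PySem.List.pyRange 0 ((seq.length : Int) - 1) 1).foldl
        (fun results index => results ++ [PySem.List.slice seq (some index) (some (index + 2))]) []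
      = (PySem.List.pyRange 0 ((seq.length : Int) - 1) 1).map
          (fun index => PySem.List.slice seq (some index) (some (index + 2))) from by
    simpa using PySem.List.foldl_append_singleton_eq_map
      (fun index => PySem.List.slice seq (some index) (some (index + 2))) _ []]
  rw [PySem.List.pyRange_one, List.map_map,
    show ((seq.length : Int) - 1 - 0).toNat = seq.length - 1 from by omega]
  rw [zip_tail_get seq, List.map_map]
  apply List.map_congr_left
  intro k hk
  have hk' : k + 1 < seq.length := by
    have := List.mem_range.mp hk; omega
  simp only [Function.comp, zero_add]
  rw [show ((k : Int) + 2) = (k : Int) + ((2 : Nat) : Int) from by push_cast; ring,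
    PySem.List.slice_natCast_add]
  have ht : List.take 2 (List.drop k seq) = [seq[k], seq[k + 1]] := by
    rw [List.drop_eq_getElem_cons (by omega : k < seq.length),
      List.drop_eq_getElem_cons (by omega : k + 1 < seq.length)]
    simp only [show (2:Nat) = 0 + 1 + 1 from rfl, List.take_succ_cons, List.take_zero]
  rw [ht]
  simp [List.getD_eq_getElem?_getD, hk', Nat.lt_of_succ_lt hk']

-- ===== VERDICT (by name: the statement is the Claim_ definition above) =====
theorem calculate_dist_spec : Claim_equal_calculate_dist := by
  intro seq distances _ hpre
  obtain ⟨hne, -⟩ := hpre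
  unfold Spec_calculate_dist calculate_dist calculate_dist_alt
  obtain ⟨x, xs, rfl⟩ := List.exists_cons_of_ne_nil hne
  dsimp only
  -- B side: divide-and-conquer = sum of leg weights = sum over consecutive pairs of ext
  have hn : ("work" :: ((x :: xs) ++ ["home"])).length - 1 = xs.length + 2 := by simp
  rw [hn, costB_eq distances _ (xs.length + 2) 0 (xs.length + 2) (by omega) (by omega),
    ← Finset.range_eq_Ico, ← sum_map_range]
  have hB : (List.range (xs.length + 2)).map (legW distances ("work" :: ((x :: xs) ++ ["home"])))
      = (("work" :: ((x :: xs) ++ ["home"])).zip ((x :: xs) ++ ["home"])).map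
          (fun p => pvDist (pvRow distances p.1) p.2) := by
    have hzt := zip_tail_get ("work" :: ((x :: xs) ++ ["home"]))
    simp only [List.tail_cons] at hzt
    rw [hzt, hn, List.map_map]
    simp [legW]
  rw [hB]
  -- A side: windows fold = sum over consecutive pairs of seq
  rw [windowsA_eq_zip]
  simp only [List.foldl_map]
  rw [show PySem.List.pyGetD (x :: xs) 0 "" = x from by simp [PySem.List.pyGetD]]
  rw [show PySem.List.pyGetD (x :: xs) (-1) "" = (x :: xs).getLast?.getD "" from by
    simp [PySem.List.pyGetD, PySem.List.pyGet?_neg_one]]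
  rw [show (fun (total : Int) (path : String × String) =>
        total + pvDist (pvRow distances (PySem.List.pyGetD [path.1, path.2] 0 ""))
          (PySem.List.pyGetD [path.1, path.2] 1 ""))
      = (fun (total : Int) (p : String × String) => total + pvDist (pvRow distances p.1) p.2) from by
    funext a p; simp [PySem.List.pyGetD, PySem.List.pyGet?, PySem.List.pyIdx?]]
  rw [PySem.List.foldl_add ((x :: xs).zip (x :: xs).tail)
    (fun p : String × String => pvDist (pvRow distances p.1) p.2)
    (pvDist (pvRow distances "work") x)]
  -- expand ext.zip ext.tail = (work, x) :: (seq pairs ++ [(last, home)])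
  have hz := zip_append_home "home" "" (x :: xs) hne
  simp only [List.tail_cons, List.cons_append] at hz
  simp only [List.tail_cons, List.cons_append, List.zip_cons_cons]
  rw [hz]
  simp only [List.map_cons, List.map_append, List.sum_cons, List.sum_append, List.map_cons,
    List.map_nil, List.sum_cons, List.sum_nil]
  ring
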